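-- pv_equiv track=rewrite | github.com/caocong98/ppt-clone | scripts/batch_clone_four.py | _trim_to
-- ===== SOURCE A (Python) =====
-- def _trim_to(s: str, n: int) -> str:
--     """可见字符数裁到 n。"""
--     if n <= 0:
--         return ""
--     out: list[str] = []
--     count = 0
--     for ch in s:
--         if ch in (" ", "\n", "\t", "\r", "\u3000"):
--             out.append(ch)
--             continue
--         if count >= n:
--             break
--         out.append(ch)
--         count += 1
--     return "".join(out)
-- ===== SOURCE B (Python) =====
-- def _trim_to(s: str, n: int) -> str:
--     """可见字符数裁到 n。"""
--     if n <= 0: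
--         return ""
--     count = 0
--     for i, ch in enumerate(s):
--         if ch not in (" ", "\n", "\t", "\r", "\u3000"):
--             if count >= n:
--                 return s[:i]
--             count += 1
--     return s
-- ===== Notes on version B (the rewrite author's own statement) =====
-- stated objective: simpler
-- what changed: B builds no output list: it scans once for the cut index (the first visible character seen after n visible ones) and returns a slice of the original string, or the string unchanged.
import Mathlib
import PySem

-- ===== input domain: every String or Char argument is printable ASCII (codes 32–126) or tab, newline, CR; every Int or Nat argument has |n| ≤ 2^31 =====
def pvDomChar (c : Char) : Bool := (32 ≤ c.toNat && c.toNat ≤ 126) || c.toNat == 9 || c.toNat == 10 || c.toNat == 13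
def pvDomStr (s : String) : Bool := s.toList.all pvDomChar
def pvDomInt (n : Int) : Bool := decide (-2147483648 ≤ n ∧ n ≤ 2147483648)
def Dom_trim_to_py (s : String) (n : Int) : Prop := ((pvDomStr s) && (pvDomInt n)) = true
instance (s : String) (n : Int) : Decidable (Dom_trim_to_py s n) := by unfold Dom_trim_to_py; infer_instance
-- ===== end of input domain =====

-- B avoids A's output list: one scan finds the cut index and slices the original string (objective: simpler).

-- whitespace test shared by both Pythons: ch in (" ", "\n", "\t", "\r", "\u3000")
def pvIsWs (c : Char) : Bool := c = ' ' || c = '\n' || c = '\t' || c = '\r' || c = '\u3000'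

-- ===== PORT A =====
-- A's for-loop with `out`/`count` state and `break`, as structural recursion
def trimAGo (n : Int) : List Char → Int → List Char
  | [], _ => []
  | c :: rest, count =>
    if pvIsWs c then c :: trimAGo n rest count
    else if count ≥ n then []
    else c :: trimAGo n rest (count + 1)

def trim_to_py (s : String) (n : Int) : String :=
  if n ≤ 0 then "" else String.ofList (trimAGo n s.toList 0)

-- ===== PORT B =====
-- B's for-loop over enumerate(s): index i and visible-count, returning s[:i] or s
def trimBGo (s : String) (n : Int) : List Char → Nat → Int → String
  | [], _, _ => s
  | c :: rest, i, count =>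
    if ¬ pvIsWs c then
      if count ≥ n then PySem.Str.slice s none (some (i : Int))
      else trimBGo s n rest (i + 1) (count + 1)
    else trimBGo s n rest (i + 1) count

def trim_to_py_alt (s : String) (n : Int) : String :=
  if n ≤ 0 then "" else trimBGo s n s.toList 0 0

-- ===== PRECONDITION & SPEC =====
def Spec_trim_to_py (s : String) (n : Int) (out : String) : Prop := out = trim_to_py_alt s n
instance (s : String) (n : Int) (out : String) : Decidable (Spec_trim_to_py s n out) := by unfold Spec_trim_to_py; infer_instance

-- ===== CLAIM (what is proved, stated in full; the proofs are below) =====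
def Claim_equal_trim_to_py : Prop := ∀ (s : String) (n : Int), Dom_trim_to_py s n → Spec_trim_to_py s n (trim_to_py s n)

-- ===== LEMMAS AND PROOFS =====

lemma slice_take (s : String) (i : Nat) :
    PySem.Str.slice s none (some (i : Int)) = String.ofList (s.toList.take i) := by
  apply String.toList_inj.mp
  simp [PySem.Str.toList_slice, PySem.List.slice_to_natCast]

lemma trimGo_agree (s : String) (n : Int) :
    ∀ (cs : List Char) (i : Nat) (count : Int), s.toList.drop i = cs →
      trimBGo s n cs i count = String.ofList (s.toList.take i ++ trimAGo n cs count) := by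
  intro cs
  induction cs with
  | nil =>
    intro i count h
    have : s.toList.take i = s.toList := by
      have := List.take_append_drop i s.toList
      rw [h] at this; simpa using this
    simp [trimBGo, trimAGo, this]
  | cons c rest ih =>
    intro i count h
    have htake : s.toList.take (i + 1) = s.toList.take i ++ [c] := by
      have hi : s.toList[i]? = some c := by
        have := congrArg List.head? h
        rwa [List.head?_drop] at this
      rw [List.take_add_one, hi]; rfl
    have hdrop : s.toList.drop (i + 1) = rest := by
      have := congrArg List.tail h
      rwa [List.tail_drop] at this
    by_cases hw : pvIsWs c
    · have := ih (i + 1) count hdrop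
      simp [trimBGo, trimAGo, hw, this, htake]
    · by_cases hc : count ≥ n
      · simp [trimBGo, trimAGo, hw, hc, slice_take]
      · have := ih (i + 1) (count + 1) hdrop
        simp [trimBGo, trimAGo, hw, hc, this, htake]

-- ===== VERDICT (by name: the statement is the Claim_ definition above) =====
theorem trim_to_py_spec : Claim_equal_trim_to_py := by
  intro s n _
  unfold Spec_trim_to_py trim_to_py trim_to_py_alt
  by_cases h : n ≤ 0
  · simp [h]
  · simp only [h, if_false]
    simpa using (trimGo_agree s n s.toList 0 0 (by simp)).symm
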